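-- pv_equiv track=rewrite | github.com/Mrsebitas32/Italy_FullTime | Italy.py | highlight_high_values
-- ===== SOURCE A (Python) =====
-- def highlight_high_values(s):
--     colors = []
--     for v in s:
--         if v >= 85:
--             colors.append('background-color: #2E8B57; font-weight: bold; color: black')  # Verde más oscuro
--         elif v >= 75:
--             colors.append('background-color: #3CB371; font-weight: bold; color: black')  # Verde intermedio
--         elif v >= 65:
--             colors.append('background-color: #98FB98; font-weight: normal; color: black')  # Verde claro
--         elif v < 10:
--             colors.append('background-color: #A52A2A; font-weight: bold; color: white')  # Rojo más oscuro
--         elif v < 20: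
--             colors.append('background-color: #CD5C5C; font-weight: bold; color: white')  # Rojo intermedio
--         else:
--             colors.append('')  # Sin color si no cumple con los umbrales
--     return colors
-- ===== SOURCE B (Python) =====
-- import bisect
--
-- _BREAKPOINTS = [10, 20, 65, 75, 85]
-- _STYLES = [
--     'background-color: #A52A2A; font-weight: bold; color: white',
--     'background-color: #CD5C5C; font-weight: bold; color: white',
--     '',
--     'background-color: #98FB98; font-weight: normal; color: black',
--     'background-color: #3CB371; font-weight: bold; color: black',
--     'background-color: #2E8B57; font-weight: bold; color: black',
-- ]
--
-- def highlight_high_values(s):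
--     return [_STYLES[bisect.bisect_right(_BREAKPOINTS, v)] for v in s]
-- ===== Notes on version B (the rewrite author's own statement) =====
-- stated objective: idiomatic
-- what changed: Replaced A's five-branch if/elif cascade with a sorted breakpoints list and bisect_right indexing into a parallel styles table.
import Mathlib
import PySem

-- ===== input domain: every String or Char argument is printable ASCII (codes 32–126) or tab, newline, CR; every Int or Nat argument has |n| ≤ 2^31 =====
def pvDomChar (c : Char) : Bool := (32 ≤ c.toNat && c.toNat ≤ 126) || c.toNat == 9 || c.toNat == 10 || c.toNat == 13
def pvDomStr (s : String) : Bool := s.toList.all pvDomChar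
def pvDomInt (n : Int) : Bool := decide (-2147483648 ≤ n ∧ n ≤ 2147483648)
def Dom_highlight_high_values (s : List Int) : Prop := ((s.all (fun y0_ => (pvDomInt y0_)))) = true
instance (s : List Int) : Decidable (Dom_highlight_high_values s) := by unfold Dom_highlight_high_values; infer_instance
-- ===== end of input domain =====

-- B replaces A"s five-branch if/elif cascade by a sorted breakpoints table with
-- bisect_right indexing into a parallel styles list (objective: idiomatic; same cost).

-- ===== PORT A =====
def highlight_high_values (s : List Int) : List String :=
  s.foldl (fun colors v =>
    if v ≥ 85 then colors ++ ["background-color: #2E8B57; font-weight: bold; color: black"]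
    else if v ≥ 75 then colors ++ ["background-color: #3CB371; font-weight: bold; color: black"]
    else if v ≥ 65 then colors ++ ["background-color: #98FB98; font-weight: normal; color: black"]
    else if v < 10 then colors ++ ["background-color: #A52A2A; font-weight: bold; color: white"]
    else if v < 20 then colors ++ ["background-color: #CD5C5C; font-weight: bold; color: white"]
    else colors ++ [""]) []

-- ===== PORT B =====
def pvBreakpoints : List Int := [10, 20, 65, 75, 85]

def pvStyles : List String :=
  [ "background-color: #A52A2A; font-weight: bold; color: white"
  , "background-color: #CD5C5C; font-weight: bold; color: white"
  , ""
  , "background-color: #98FB98; font-weight: normal; color: black"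
  , "background-color: #3CB371; font-weight: bold; color: black"
  , "background-color: #2E8B57; font-weight: bold; color: black" ]

-- bisect.bisect_right on a sorted list = number of elements ≤ v
def pvBisectRight (bs : List Int) (v : Int) : Nat :=
  bs.foldl (fun n b => if b ≤ v then n + 1 else n) 0

def highlight_high_values_alt (s : List Int) : List String :=
  s.map (fun v => pvStyles.getD (pvBisectRight pvBreakpoints v) "")

-- ===== PRECONDITION & SPEC =====
def Spec_highlight_high_values (s : List Int) (out : List String) : Prop := out = highlight_high_values_alt s
instance (s : List Int) (out : List String) : Decidable (Spec_highlight_high_values s out) := by unfold Spec_highlight_high_values; infer_instance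

-- ===== CLAIM (what is proved, stated in full; the proofs are below) =====
def Claim_equal_highlight_high_values : Prop := ∀ (s : List Int), Dom_highlight_high_values s → Spec_highlight_high_values s (highlight_high_values s)

-- ===== LEMMAS AND PROOFS =====

-- the per-element style B assigns
def pvStyleB (v : Int) : String := pvStyles.getD (pvBisectRight pvBreakpoints v) ""

theorem pvStyleB_eq (v : Int) :
    pvStyleB v =
      (if v ≥ 85 then "background-color: #2E8B57; font-weight: bold; color: black"
       else if v ≥ 75 then "background-color: #3CB371; font-weight: bold; color: black"
       else if v ≥ 65 then "background-color: #98FB98; font-weight: normal; color: black"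
       else if v < 10 then "background-color: #A52A2A; font-weight: bold; color: white"
       else if v < 20 then "background-color: #CD5C5C; font-weight: bold; color: white"
       else "") := by
  unfold pvStyleB pvBisectRight pvBreakpoints pvStyles
  simp only [List.foldl, List.getD]
  split_ifs <;> simp_all <;> omega

theorem foldl_A (s : List Int) (acc : List String) :
    s.foldl (fun colors v =>
      if v ≥ 85 then colors ++ ["background-color: #2E8B57; font-weight: bold; color: black"]
      else if v ≥ 75 then colors ++ ["background-color: #3CB371; font-weight: bold; color: black"]
      else if v ≥ 65 then colors ++ ["background-color: #98FB98; font-weight: normal; color: black"]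
      else if v < 10 then colors ++ ["background-color: #A52A2A; font-weight: bold; color: white"]
      else if v < 20 then colors ++ ["background-color: #CD5C5C; font-weight: bold; color: white"]
      else colors ++ [""]) acc = acc ++ s.map pvStyleB := by
  induction s generalizing acc with
  | nil => simp
  | cons v t ih =>
    simp only [List.foldl, List.map]
    rw [ih, pvStyleB_eq v]
    split_ifs <;> simp

-- ===== VERDICT (by name: the statement is the Claim_ definition above) =====
theorem highlight_high_values_spec : Claim_equal_highlight_high_values := by
  intro s _
  unfold Spec_highlight_high_values highlight_high_values highlight_high_values_alt
  rw [foldl_A s []]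
  simp [pvStyleB]
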